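-- pv_equiv track=rewrite | github.com/zentrum-lexikographie/dwdsmor | dwdsmor/cli/analyse.py | get_maximal_analyses
-- ===== SOURCE A (Python) =====
-- def count_boundaries(seg, boundaries):
--     count = sum([seg.count(boundary) for boundary in boundaries])
--     return count
--
-- def get_maximal_analyses(analyses, key, boundaries):
--     maximal_analyses = []
--     maximum = max(
--         [count_boundaries(analysis[key], boundaries) for analysis in analyses],
--         default=-1,
--     )
--     for analysis in analyses:
--         if count_boundaries(analysis[key], boundaries) == maximum:
--             maximal_analyses.append(analysis)
--     return maximal_analyses
-- ===== SOURCE B (Python) =====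
-- def get_maximal_analyses(analyses, key, boundaries):
--     best = -1
--     maximal = []
--     for analysis in analyses:
--         c = 0
--         for boundary in boundaries:
--             c += analysis[key].count(boundary)
--         if c > best:
--             best = c
--             maximal = [analysis]
--         elif c == best:
--             maximal.append(analysis)
--     return maximal
-- ===== Notes on version B (the rewrite author's own statement) =====
-- stated objective: alternative
-- what changed: Replaces the two-pass max-then-filter (which counts boundaries twice per analysis) by a single pass that maintains the running maximum and its current maximal group, counting each analysis once.
import Mathlib
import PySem

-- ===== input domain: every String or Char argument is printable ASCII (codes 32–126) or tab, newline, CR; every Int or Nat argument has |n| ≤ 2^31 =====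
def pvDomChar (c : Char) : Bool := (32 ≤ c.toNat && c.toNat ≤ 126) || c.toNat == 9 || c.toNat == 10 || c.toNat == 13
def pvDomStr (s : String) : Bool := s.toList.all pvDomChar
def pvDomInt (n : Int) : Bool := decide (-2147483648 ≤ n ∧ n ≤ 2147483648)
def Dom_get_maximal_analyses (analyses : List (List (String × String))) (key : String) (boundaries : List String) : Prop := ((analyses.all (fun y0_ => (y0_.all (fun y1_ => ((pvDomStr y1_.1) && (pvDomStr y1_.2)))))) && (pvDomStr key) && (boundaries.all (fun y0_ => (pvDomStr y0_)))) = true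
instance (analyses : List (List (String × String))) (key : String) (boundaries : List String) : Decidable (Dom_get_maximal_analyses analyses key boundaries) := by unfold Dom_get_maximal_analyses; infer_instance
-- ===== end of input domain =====

-- ===== PORT A =====
-- One line: B folds a single pass keeping the running maximum and its group, instead of A's max-then-filter two passes; A raises KeyError when an analysis lacks `key`, excluded by Pre_.
-- sum([seg.count(boundary) for boundary in boundaries])
def count_boundaries (seg : String) (boundaries : List String) : Int :=
  (boundaries.map (fun b => (PySem.Str.count seg b : Int))).sum

-- analysis[key]: first-match lookup in the association list (KeyError, i.e. missing key, is excluded by Pre_)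
def pvLookup (analysis : List (String × String)) (key : String) : String :=
  ((PySem.Dict.mk analysis).get? key).getD ""

def get_maximal_analyses (analyses : List (List (String × String))) (key : String) (boundaries : List String) : List (List (String × String)) :=
  let maximum : Int :=
    (PySem.List.max? (analyses.map (fun analysis => count_boundaries (pvLookup analysis key) boundaries)) (fun x => x)).getD (-1)
  analyses.foldl (fun maximal_analyses analysis =>
    if count_boundaries (pvLookup analysis key) boundaries == maximum then maximal_analyses ++ [analysis]
    else maximal_analyses) []

-- ===== PORT B =====
-- step of B's single pass: state = (best, maximal)
def pvStep (key : String) (boundaries : List String)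
    (st : Int × List (List (String × String))) (analysis : List (String × String)) :
    Int × List (List (String × String)) :=
  let c : Int := boundaries.foldl (fun c boundary => c + (PySem.Str.count (pvLookup analysis key) boundary : Int)) 0
  if st.1 < c then (c, [analysis])
  else if c = st.1 then (st.1, st.2 ++ [analysis])
  else st

def get_maximal_analyses_alt (analyses : List (List (String × String))) (key : String) (boundaries : List String) : List (List (String × String)) :=
  (analyses.foldl (pvStep key boundaries) ((-1 : Int), [])).2

-- ===== PRECONDITION & SPEC =====
-- Pre_ excludes exactly the inputs where A raises KeyError: some analysis has no pair with first component `key`.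
def Pre_get_maximal_analyses (analyses : List (List (String × String))) (key : String) (boundaries : List String) : Prop :=
  analyses.all (fun analysis => analysis.any (fun p => p.1 == key)) = true
instance (analyses : List (List (String × String))) (key : String) (boundaries : List String) : Decidable (Pre_get_maximal_analyses analyses key boundaries) := by unfold Pre_get_maximal_analyses; infer_instance

def pvWitness_get_maximal_analyses : (List (List (String × String))) × String × List String :=
  ([[("x", "a+b")], [("x", "c+d+e")]], "x", ["+"])

def Spec_get_maximal_analyses (analyses : List (List (String × String))) (key : String) (boundaries : List String) (out : List (List (String × String))) : Prop := out = get_maximal_analyses_alt analyses key boundaries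
instance (analyses : List (List (String × String))) (key : String) (boundaries : List String) (out : List (List (String × String))) : Decidable (Spec_get_maximal_analyses analyses key boundaries out) := by unfold Spec_get_maximal_analyses; infer_instance

-- ===== CLAIM =====
def Claim_equal_get_maximal_analyses : Prop := ∀ (analyses : List (List (String × String))) (key : String) (boundaries : List String), Dom_get_maximal_analyses analyses key boundaries → Pre_get_maximal_analyses analyses key boundaries → Spec_get_maximal_analyses analyses key boundaries (get_maximal_analyses analyses key boundaries)

-- ===== LEMMAS AND PROOFS =====

-- B's inner count loop computes A's count_boundaries
lemma pvStep_count (analysis : List (String × String)) (key : String) (boundaries : List String) :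
    boundaries.foldl (fun c boundary => c + (PySem.Str.count (pvLookup analysis key) boundary : Int)) 0
      = count_boundaries (pvLookup analysis key) boundaries := by
  unfold count_boundaries
  rw [List.sum_eq_foldl, List.foldl_map]

lemma count_boundaries_nonneg (seg : String) (boundaries : List String) :
    0 ≤ count_boundaries seg boundaries := by
  unfold count_boundaries
  apply List.sum_nonneg
  intro x hx
  simp only [List.mem_map] at hx
  obtain ⟨b, _, rfl⟩ := hx
  positivity

-- single-pass invariant: after the whole fold, state = (max of counts with default -1, group of the max)
lemma pvFold_eq (key : String) (boundaries : List String) (l : List (List (String × String))) :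
    l.foldl (pvStep key boundaries) ((-1 : Int), []) =
      ((l.map (fun a => count_boundaries (pvLookup a key) boundaries)).foldl max (-1),
       l.filter (fun a => count_boundaries (pvLookup a key) boundaries
          == (l.map (fun a => count_boundaries (pvLookup a key) boundaries)).foldl max (-1))) := by
  induction l using List.reverseRecOn with
  | nil => simp
  | append_singleton t a ih =>
    have hle : ∀ x ∈ t, count_boundaries (pvLookup x key) boundaries ≤
        (t.map (fun a => count_boundaries (pvLookup a key) boundaries)).foldl max (-1) := by
      intro x hx
      exact (PySem.List.le_foldl_max _ _).2 _ (List.mem_map_of_mem hx)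
    set M := (t.map (fun a => count_boundaries (pvLookup a key) boundaries)).foldl max (-1) with hM
    have hMnew : ((t ++ [a]).map (fun a => count_boundaries (pvLookup a key) boundaries)).foldl max (-1)
        = max M (count_boundaries (pvLookup a key) boundaries) := by
      simp [List.foldl_append, hM]
    rw [List.foldl_append, ih, hMnew]
    simp only [List.foldl_cons, List.foldl_nil, List.filter_append]
    unfold pvStep
    rw [pvStep_count]
    set c := count_boundaries (pvLookup a key) boundaries with hc
    by_cases h1 : M < c
    · simp only [h1, if_pos]
      have hmax : max M c = c := by omega
      rw [hmax]
      have : t.filter (fun x => count_boundaries (pvLookup x key) boundaries == c) = [] := by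
        apply List.filter_eq_nil_iff.mpr
        intro x hx
        have := hle x hx
        simp only [beq_iff_eq]
        omega
      simp [this, List.filter, ← hc]
    · have hmax : max M c = M := by omega
      rw [hmax]
      by_cases h2 : c = M
      · simp [List.filter, ← hc, h2]
      · simp only [h1, h2, if_false]
        have : (count_boundaries (pvLookup a key) boundaries == M) = false := by
          simp [← hc, h2]
        simp [List.filter, this]

-- A's maximum equals the running fold max with init -1 (counts are nonnegative, so the -1 default is absorbed)
lemma pvMax_eq (key : String) (boundaries : List String) (l : List (List (String × String))) :
    (PySem.List.max? (l.map (fun a => count_boundaries (pvLookup a key) boundaries)) (fun x => x)).getD (-1)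
      = (l.map (fun a => count_boundaries (pvLookup a key) boundaries)).foldl max (-1) := by
  cases l with
  | nil => simp [PySem.List.max?]
  | cons a t =>
    simp only [List.map_cons]
    rw [PySem.List.max?_id_cons]
    simp only [Option.getD_some, List.foldl_cons]
    have : max (-1 : Int) (count_boundaries (pvLookup a key) boundaries) = count_boundaries (pvLookup a key) boundaries := by
      have := count_boundaries_nonneg (pvLookup a key) boundaries
      omega
    rw [this]

-- ===== VERDICT =====
theorem get_maximal_analyses_spec : Claim_equal_get_maximal_analyses := by
  intro analyses key boundaries _ _
  unfold Spec_get_maximal_analyses get_maximal_analyses get_maximal_analyses_alt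
  rw [pvFold_eq]
  simp only
  rw [pvMax_eq]
  rw [PySem.List.foldl_append_if_eq_filter]
  simp
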